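-- pv_equiv track=rewrite | github.com/Tamir-K/Advent-of-Code-2025 | day10_part1.py | find_num_presses
-- ===== SOURCE A (Python) =====
-- import itertools
-- from functools import reduce
--
-- ON = "#"
--
-- def infinite_combinations_with_replacement(lst):
--     for length in itertools.count(start=1):
--         yield from itertools.combinations_with_replacement(lst, length)
--
-- def find_num_presses(indicator_lights, buttons):
--     indicator_lights = {
--         position for position, light in enumerate(indicator_lights) if light == ON
--     }
--     possible_combinations = infinite_combinations_with_replacement(buttons)
--     presses_final_state = {}
--     while presses_final_state != indicator_lights:
--         guess = next(possible_combinations)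
--         presses_final_state = reduce(set.symmetric_difference, guess)
--     return len(guess)
-- ===== SOURCE B (Python) =====
-- ON = "#"
--
-- def find_num_presses(indicator_lights, buttons):
--     target = frozenset(
--         position for position, light in enumerate(indicator_lights) if light == ON
--     )
--     btns = [frozenset(b) for b in buttons]
--     current = {frozenset()}
--     presses = 0
--     while True:
--         presses += 1
--         nxt = set()
--         for s in current:
--             for b in btns:
--                 t = s ^ b
--                 if t == target:
--                     return presses
--                 nxt.add(t)
--         current = nxt
-- ===== Notes on version B (the rewrite author's own statement) =====
-- stated objective: alternative
-- what changed: A enumerates every length-k combination-with-replacement of buttons and XOR-reduces each guess; B does a level-by-level breadth-first sweep that maintains only the deduplicated set of light configurations reachable after exactly k presses and checks each new configuration as it is generated.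
import Mathlib
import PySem

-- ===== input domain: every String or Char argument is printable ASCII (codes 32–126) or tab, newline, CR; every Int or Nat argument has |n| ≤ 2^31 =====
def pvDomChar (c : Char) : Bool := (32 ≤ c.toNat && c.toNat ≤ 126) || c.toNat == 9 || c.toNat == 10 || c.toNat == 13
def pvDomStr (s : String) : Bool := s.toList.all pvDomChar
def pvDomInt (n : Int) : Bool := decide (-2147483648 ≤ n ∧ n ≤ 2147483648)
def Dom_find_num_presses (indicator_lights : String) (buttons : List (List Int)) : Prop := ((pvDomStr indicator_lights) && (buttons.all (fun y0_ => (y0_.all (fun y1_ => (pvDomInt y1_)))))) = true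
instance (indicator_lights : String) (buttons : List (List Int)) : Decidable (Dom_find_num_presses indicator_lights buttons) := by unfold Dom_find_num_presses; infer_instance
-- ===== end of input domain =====

-- B replaces A's enumeration of all length-k button combinations by a breadth-first
-- sweep over the (deduplicated) set of light configurations reachable after exactly k
-- presses (checking each freshly generated configuration); same return value
-- wherever A terminates, objective: a genuinely different algorithm (not timed faster).
-- Both Python loops diverge on unreachable targets; the ports totalize that identical
-- search with the same fuel bound (buttons.length + 2 levels, enough whenever A terminates) and
-- return 0 on exhaustion — a guard for totality only, not an algorithm switch.

-- ===== PORT A =====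
-- {position for position, light in enumerate(indicator_lights) if light == ON}
def pvTargetSet (indicator_lights : String) : List Int :=
  PySem.Set.ofList
    (((PySem.List.enumerate indicator_lights.toList 0).filter (fun p => p.2 == '#')).map
      (fun p => p.1))

-- itertools.combinations_with_replacement(xs, k), in itertools order
def pvCWR {α : Type} : List α → Nat → List (List α)
  | _, 0 => [[]]
  | [], _ + 1 => []
  | x :: xs, k + 1 => ((pvCWR (x :: xs) k).map (fun c => x :: c)) ++ pvCWR xs (k + 1)
  termination_by xs k => (k, xs.length)

-- reduce(set.symmetric_difference, guess) (guess nonempty: every yielded combination is)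
def pvReduceXor : List (List Int) → List Int
  | [] => []
  | b :: rest => rest.foldl PySem.Set.symmDiff b

-- the while loop: consume combinations level by level (all guesses of one length have
-- the same len, so scanning a level for a match is the generator consumption), fueled
def pvLoopA (target : List Int) (bs : List (List Int)) : Nat → Nat → Int
  | 0, _ => 0
  | fuel + 1, k =>
    if (pvCWR bs k).any (fun g => PySem.Set.equal (pvReduceXor g) target) then (k : Int)
    else pvLoopA target bs fuel (k + 1)

def find_num_presses (indicator_lights : String) (buttons : List (List Int)) : Int :=
  let target := pvTargetSet indicator_lights
  let bs := buttons.map (fun b => PySem.Set.ofList b)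
  pvLoopA target bs (buttons.length + 2) 1

-- ===== PORT B =====
-- a Python set of frozensets: list of states, deduplicated by set-equality
def pvDedupEq (l : List (List Int)) : List (List Int) :=
  l.foldl (fun acc s => if acc.any (fun t => PySem.Set.equal t s) then acc else acc ++ [s]) []

-- the while loop: generate s ^ b for every state s and button b, return as soon as one
-- equals the target, else continue from the deduplicated next level, fueled
def pvLoopB (target : List Int) (bs : List (List Int)) : Nat → Nat → List (List Int) → Int
  | 0, _, _ => 0
  | fuel + 1, presses, cur =>
    let gen := cur.flatMap (fun s => bs.map (fun b => PySem.Set.symmDiff s b))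
    if gen.any (fun t => PySem.Set.equal t target) then (presses : Int)
    else pvLoopB target bs fuel (presses + 1) (pvDedupEq gen)

def find_num_presses_alt (indicator_lights : String) (buttons : List (List Int)) : Int :=
  let target := pvTargetSet indicator_lights
  let bs := buttons.map (fun b => PySem.Set.ofList b)
  pvLoopB target bs (buttons.length + 2) 1 [PySem.Set.empty]

-- ===== PRECONDITION & SPEC =====
def Spec_find_num_presses (indicator_lights : String) (buttons : List (List Int)) (out : Int) : Prop := out = find_num_presses_alt indicator_lights buttons
instance (indicator_lights : String) (buttons : List (List Int)) (out : Int) : Decidable (Spec_find_num_presses indicator_lights buttons out) := by unfold Spec_find_num_presses; infer_instance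

-- ===== CLAIM (what is proved, stated in full; the proofs are below) =====
def Claim_equal_find_num_presses : Prop := ∀ (indicator_lights : String) (buttons : List (List Int)), Dom_find_num_presses indicator_lights buttons → Spec_find_num_presses indicator_lights buttons (find_num_presses indicator_lights buttons)

-- ===== LEMMAS AND PROOFS =====

-- parity of the number of pressed buttons containing light x
def pvPar (g : List (List Int)) (x : Int) : Prop :=
  (g.countP (fun b => decide (x ∈ b))) % 2 = 1

-- "same set": equal membership
def pvE (u t : List Int) : Prop := ∀ x : Int, x ∈ u ↔ x ∈ t

-- reachable in exactly k presses (as a membership function)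
def pvReach (bs : List (List Int)) (k : Nat) (t : List Int) : Prop :=
  ∃ g : List (List Int), g.length = k ∧ (∀ b ∈ g, b ∈ bs) ∧ ∀ x, x ∈ t ↔ pvPar g x

theorem pvPar_cons (b : List Int) (g : List (List Int)) (x : Int) :
    pvPar (b :: g) x ↔ (x ∈ b ↔ ¬ pvPar g x) := by
  simp only [pvPar, List.countP_cons]
  by_cases hx : x ∈ b <;> simp [hx] <;> omega

theorem pvPar_append (g h : List (List Int)) (x : Int) :
    pvPar (g ++ h) x ↔ (pvPar g x ↔ ¬ pvPar h x) := by
  simp only [pvPar, List.countP_append]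
  omega

theorem pvPar_perm {g h : List (List Int)} (p : g.Perm h) (x : Int) :
    pvPar g x ↔ pvPar h x := by
  simp only [pvPar, p.countP_eq]

theorem pv_mem_foldl_symmDiff (g : List (List Int)) (s : List Int) (x : Int) :
    x ∈ g.foldl PySem.Set.symmDiff s ↔ (x ∈ s ↔ ¬ pvPar g x) := by
  induction g generalizing s with
  | nil => simp [pvPar]
  | cons b rest ih =>
    simp only [List.foldl_cons, ih, PySem.Set.mem_symmDiff, pvPar_cons]
    by_cases hb : x ∈ b <;> by_cases hr : pvPar rest x <;> simp [hb, hr]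

theorem pv_mem_reduceXor {g : List (List Int)} (hg : g ≠ []) (x : Int) :
    x ∈ pvReduceXor g ↔ pvPar g x := by
  cases g with
  | nil => exact absurd rfl hg
  | cons b rest =>
    simp only [pvReduceXor, pv_mem_foldl_symmDiff, pvPar_cons]

theorem pvCWR_sound {α : Type} (xs : List α) (k : Nat) :
    ∀ c ∈ pvCWR xs k, c.length = k ∧ ∀ b ∈ c, b ∈ xs := by
  induction xs, k using pvCWR.induct with
  | case1 xs =>
    intro c hc
    simp only [pvCWR, List.mem_singleton] at hc
    subst hc
    exact ⟨rfl, by simp⟩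
  | case2 k => intro c hc; simp [pvCWR] at hc
  | case3 x xs k ih1 ih2 =>
    intro c hc
    simp only [pvCWR, List.mem_append, List.mem_map] at hc
    rcases hc with ⟨c', hc', rfl⟩ | hc
    · obtain ⟨hl, hm⟩ := ih1 c' hc'
      refine ⟨by simp [hl], ?_⟩
      intro b hb
      rcases List.mem_cons.mp hb with rfl | hb
      · exact List.mem_cons_self
      · exact hm b hb
    · obtain ⟨hl, hm⟩ := ih2 c hc
      exact ⟨hl, fun b hb => List.mem_cons_of_mem _ (hm b hb)⟩

theorem pvCWR_complete {α : Type} [DecidableEq α] (xs : List α) :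
    ∀ (k : Nat) (g : List α), g.length = k → (∀ b ∈ g, b ∈ xs) →
      ∃ c ∈ pvCWR xs k, c.Perm g := by
  induction xs with
  | nil =>
    intro k g hl hm
    cases g with
    | nil => subst hl; exact ⟨[], by simp [pvCWR], List.Perm.refl _⟩
    | cons b g' => exact absurd (hm b List.mem_cons_self) (by simp)
  | cons x xs ih =>
    intro k
    induction k with
    | zero =>
      intro g hl _
      rw [List.length_eq_zero_iff] at hl; subst hl
      exact ⟨[], by simp [pvCWR], List.Perm.refl _⟩
    | succ k ihk =>
      intro g hl hm
      by_cases hx : x ∈ g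
      · have hperm : g.Perm (x :: g.erase x) := List.perm_cons_erase hx
        have hl' : (g.erase x).length = k := by
          have := List.length_erase_of_mem hx
          omega
        have hm' : ∀ b ∈ g.erase x, b ∈ x :: xs :=
          fun b hb => hm b (List.mem_of_mem_erase hb)
        obtain ⟨c, hc, hcp⟩ := ihk (g.erase x) hl' hm'
        refine ⟨x :: c, ?_, ?_⟩
        · simp only [pvCWR, List.mem_append, List.mem_map]
          exact Or.inl ⟨c, hc, rfl⟩
        · exact ((hcp.cons x).trans hperm.symm).symm.symm
      · have hm' : ∀ b ∈ g, b ∈ xs := by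
          intro b hb
          rcases List.mem_cons.mp (hm b hb) with rfl | h
          · exact absurd hb hx
          · exact h
        obtain ⟨c, hc, hcp⟩ := ih (k + 1) g hl hm'
        refine ⟨c, ?_, hcp⟩
        simp only [pvCWR, List.mem_append]
        exact Or.inr hc

theorem pv_lemA (bs : List (List Int)) (t : List Int) (k : Nat) (hk : 0 < k) :
    (pvCWR bs k).any (fun g => PySem.Set.equal (pvReduceXor g) t) = true ↔ pvReach bs k t := by
  rw [List.any_eq_true]
  constructor
  · rintro ⟨c, hc, he⟩
    obtain ⟨hl, hm⟩ := pvCWR_sound bs k c hc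
    have hne : c ≠ [] := by intro h; subst h; simp at hl; omega
    rw [PySem.Set.equal_iff] at he
    exact ⟨c, hl, hm, fun x => by rw [← he x, pv_mem_reduceXor hne]⟩
  · rintro ⟨g, hl, hm, hmem⟩
    obtain ⟨c, hc, hcp⟩ := pvCWR_complete bs k g hl hm
    refine ⟨c, hc, ?_⟩
    have hne : c ≠ [] := by
      intro h; subst h
      have := hcp.length_eq; simp at this; omega
    rw [PySem.Set.equal_iff]
    intro x
    rw [pv_mem_reduceXor hne, pvPar_perm hcp, ← hmem x]

theorem pv_dedupEq_aux (l acc : List (List Int)) (t : List Int) :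
    (∃ u ∈ l.foldl (fun acc s => if acc.any (fun t => PySem.Set.equal t s) then acc else acc ++ [s]) acc, pvE u t)
      ↔ (∃ u ∈ acc, pvE u t) ∨ (∃ u ∈ l, pvE u t) := by
  induction l generalizing acc with
  | nil => simp
  | cons s l ih =>
    simp only [List.foldl_cons]
    by_cases h : acc.any (fun t => PySem.Set.equal t s) = true
    · rw [if_pos h, ih]
      rw [List.any_eq_true] at h
      obtain ⟨u0, hu0, he0⟩ := h
      rw [PySem.Set.equal_iff] at he0
      constructor
      · rintro (h | h)
        · exact Or.inl h
        · exact Or.inr ⟨_, List.mem_cons_of_mem _ h.choose_spec.1, h.choose_spec.2⟩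
      · rintro (h | ⟨u, hu, he⟩)
        · exact Or.inl h
        · rcases List.mem_cons.mp hu with rfl | hu
          · exact Or.inl ⟨u0, hu0, fun x => (he0 x).trans (he x)⟩
          · exact Or.inr ⟨u, hu, he⟩
    · rw [if_neg h, ih]
      constructor
      · rintro (⟨u, hu, he⟩ | h)
        · rcases List.mem_append.mp hu with hu | hu
          · exact Or.inl ⟨u, hu, he⟩
          · simp only [List.mem_singleton] at hu; subst hu
            exact Or.inr ⟨u, List.mem_cons_self, he⟩
        · exact Or.inr (h.imp fun u hu => ⟨List.mem_cons_of_mem _ hu.1, hu.2⟩)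
      · rintro (⟨u, hu, he⟩ | ⟨u, hu, he⟩)
        · exact Or.inl ⟨u, List.mem_append_left _ hu, he⟩
        · rcases List.mem_cons.mp hu with rfl | hu
          · exact Or.inl ⟨u, List.mem_append_right _ (List.mem_singleton.mpr rfl), he⟩
          · exact Or.inr ⟨u, hu, he⟩

theorem pv_mem_dedupEq (l : List (List Int)) (t : List Int) :
    (∃ u ∈ pvDedupEq l, pvE u t) ↔ ∃ u ∈ l, pvE u t := by
  unfold pvDedupEq
  rw [pv_dedupEq_aux]
  simp

-- cur is exactly the set of states reachable in k presses
def pvLev (bs : List (List Int)) (cur : List (List Int)) (k : Nat) : Prop :=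
  ∀ t, (∃ u ∈ cur, pvE u t) ↔ pvReach bs k t

theorem pvLev_zero (bs : List (List Int)) : pvLev bs [PySem.Set.empty] 0 := by
  intro t
  constructor
  · rintro ⟨u, hu, he⟩
    simp only [List.mem_singleton] at hu; subst hu
    refine ⟨[], rfl, by simp, fun x => ?_⟩
    have h1 : x ∉ t := fun hx => by
      have := (he x).mpr hx
      simp [PySem.Set.empty] at this
    simp [pvPar, h1]
  · rintro ⟨g, hl, _, hmem⟩
    rw [List.length_eq_zero_iff] at hl; subst hl
    refine ⟨PySem.Set.empty, List.mem_singleton.mpr rfl, fun x => ?_⟩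
    simp [PySem.Set.empty, hmem x, pvPar]

theorem pvLev_step (bs cur : List (List Int)) (k : Nat) (h : pvLev bs cur k) :
    ∀ t, (∃ u ∈ cur.flatMap (fun s => bs.map (fun b => PySem.Set.symmDiff s b)), pvE u t)
      ↔ pvReach bs (k + 1) t := by
  intro t
  constructor
  · rintro ⟨v, hv, he⟩
    simp only [List.mem_flatMap, List.mem_map] at hv
    obtain ⟨s, hs, b, hb, rfl⟩ := hv
    obtain ⟨g, hl, hm, hmem⟩ := (h s).mp ⟨s, hs, fun _ => Iff.rfl⟩
    refine ⟨g ++ [b], by simp [hl], ?_, fun x => ?_⟩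
    · intro b' hb'
      rcases List.mem_append.mp hb' with hb' | hb'
      · exact hm b' hb'
      · simp only [List.mem_singleton] at hb'; subst hb'; exact hb
    · rw [← he x, PySem.Set.mem_symmDiff, pvPar_append]
      have := hmem x
      by_cases h1 : x ∈ s <;> by_cases h2 : x ∈ b <;>
        simp [h1, h2, pvPar] at this ⊢ <;> omega
  · rintro ⟨g, hl, hm, hmem⟩
    rcases g.eq_nil_or_concat with rfl | ⟨g', b, hg⟩
    · simp at hl
    · rw [List.concat_eq_append] at hg
      subst hg
      have hlen : g'.length = k := by simp at hl; omega
      set s0 := g'.foldl PySem.Set.symmDiff PySem.Set.empty with hs0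
      have hmem0 : ∀ x, x ∈ s0 ↔ pvPar g' x := by
        intro x
        rw [hs0, pv_mem_foldl_symmDiff]
        simp [PySem.Set.empty]
      have hreach : pvReach bs k s0 :=
        ⟨g', hlen, fun b' hb' => hm b' (List.mem_append_left _ hb'), hmem0⟩
      obtain ⟨s, hs, hes⟩ := (h s0).mpr hreach
      have hb : b ∈ bs := hm b (List.mem_append_right _ (List.mem_singleton.mpr rfl))
      refine ⟨PySem.Set.symmDiff s b, ?_, fun x => ?_⟩
      · simp only [List.mem_flatMap, List.mem_map]
        exact ⟨s, hs, b, hb, rfl⟩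
      · have h1 : x ∈ s ↔ pvPar g' x := (hes x).trans (hmem0 x)
        have h2 : pvPar [b] x ↔ x ∈ b := by
          by_cases hb2 : x ∈ b <;> simp [pvPar, hb2]
        rw [PySem.Set.mem_symmDiff, hmem x, pvPar_append]
        simp only [h2]
        tauto

theorem pvLev_dedup_step (bs cur : List (List Int)) (k : Nat) (h : pvLev bs cur k) :
    pvLev bs (pvDedupEq (cur.flatMap (fun s => bs.map (fun b => PySem.Set.symmDiff s b)))) (k + 1) := by
  intro t
  rw [pv_mem_dedupEq]
  exact pvLev_step bs cur k h t

theorem pv_loop_eq (target : List Int) (bs : List (List Int)) :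
    ∀ (fuel k : Nat) (cur : List (List Int)), pvLev bs cur k →
      pvLoopA target bs fuel (k + 1) = pvLoopB target bs fuel (k + 1) cur := by
  intro fuel
  induction fuel with
  | zero => intro k cur _; rfl
  | succ fuel ih =>
    intro k cur hlev
    have hstep := pvLev_step bs cur k hlev
    have hcond :
        ((pvCWR bs (k + 1)).any (fun g => PySem.Set.equal (pvReduceXor g) target))
          = ((cur.flatMap (fun s => bs.map (fun b => PySem.Set.symmDiff s b))).any
              (fun t => PySem.Set.equal t target)) := by
      rcases hB : (cur.flatMap (fun s => bs.map (fun b => PySem.Set.symmDiff s b))).any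
          (fun t => PySem.Set.equal t target) with _ | _
      · rw [Bool.eq_false_iff]
        intro hA
        have hr := (pv_lemA bs target (k + 1) (Nat.succ_pos k)).mp hA
        obtain ⟨u, hu, he⟩ := (hstep target).mpr hr
        have : (cur.flatMap (fun s => bs.map (fun b => PySem.Set.symmDiff s b))).any
            (fun t => PySem.Set.equal t target) = true :=
          List.any_eq_true.mpr ⟨u, hu, (PySem.Set.equal_iff _ _).mpr he⟩
        rw [hB] at this; exact Bool.false_ne_true this
      · obtain ⟨u, hu, he⟩ := List.any_eq_true.mp hB
        rw [PySem.Set.equal_iff] at he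
        exact (pv_lemA bs target (k + 1) (Nat.succ_pos k)).mpr
          ((hstep target).mp ⟨u, hu, he⟩)
    show (if (pvCWR bs (k+1)).any (fun g => PySem.Set.equal (pvReduceXor g) target) then ((k+1 : Nat) : Int)
          else pvLoopA target bs fuel (k + 2)) = _
    rw [hcond]
    show _ = (if (cur.flatMap (fun s => bs.map (fun b => PySem.Set.symmDiff s b))).any
              (fun t => PySem.Set.equal t target) then ((k+1 : Nat) : Int)
          else pvLoopB target bs fuel (k + 2)
            (pvDedupEq (cur.flatMap (fun s => bs.map (fun b => PySem.Set.symmDiff s b)))))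
    by_cases hB : (cur.flatMap (fun s => bs.map (fun b => PySem.Set.symmDiff s b))).any
        (fun t => PySem.Set.equal t target) = true
    · rw [if_pos hB, if_pos hB]
    · rw [if_neg hB, if_neg hB]
      exact ih (k + 1) _ (pvLev_dedup_step bs cur k hlev)

-- ===== VERDICT (by name: the statement is the Claim_ definition above) =====
theorem find_num_presses_spec : Claim_equal_find_num_presses := by
  unfold Claim_equal_find_num_presses
  intro indicator_lights buttons _
  unfold Spec_find_num_presses find_num_presses find_num_presses_alt
  exact pv_loop_eq (pvTargetSet indicator_lights) (buttons.map (fun b => PySem.Set.ofList b))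
    (buttons.length + 2) 0 [PySem.Set.empty]
    (pvLev_zero (buttons.map (fun b => PySem.Set.ofList b)))
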